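-- pv_equiv track=rewrite | github.com/ChuBreCodeRa/grocy-recipe-assistant | backend/app/recipes.py | _prioritize_cooking_ingredients
-- ===== SOURCE A (Python) =====
-- def _prioritize_cooking_ingredients(ingredients, max_count=15):
--     """
--     Prioritize ingredients that are commonly used in cooking to reduce the complexity
--     of AI prompts while maintaining quality ingredient combinations.
--
--     Args:
--         ingredients: Full list of ingredients
--         max_count: Maximum number of ingredients to return
--
--     Returns:
--         Prioritized list of ingredients (limited to max_count)
--     """
--     # Common cooking ingredient categories with priority order
--     priority_categories = [
--         # Proteins (highest priority)
--         [
--             "chicken",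
--             "beef",
--             "pork",
--             "fish",
--             "tuna",
--             "shrimp",
--             "tofu",
--             "beans",
--             "lentils",
--         ],
--         # Starches/Grains
--         ["rice", "pasta", "potato", "bread", "noodle", "quinoa"],
--         # Vegetables
--         [
--             "onion",
--             "garlic",
--             "tomato",
--             "carrot",
--             "broccoli",
--             "spinach",
--             "lettuce",
--             "pepper",
--         ],
--         # Dairy
--         ["cheese", "milk", "yogurt", "cream", "butter"],
--         # Condiments/Sauces
--         ["sauce", "oil", "vinegar", "mayonnaise", "mustard", "ketchup", "salsa"],
--     ]
--
--     # Score each ingredient based on its presence in priority categories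
--     scored_ingredients = []
--     for ing in ingredients:
--         ing_lower = ing.lower()
--
--         # Start with a low base score
--         score = 0
--
--         for i, category in enumerate(priority_categories):
--             category_score = 5 - i  # Highest score for first category
--             if any(keyword in ing_lower for keyword in category):
--                 score = category_score
--                 break
--
--         scored_ingredients.append((ing, score))
--
--     # Sort by score (descending) and return limited list
--     sorted_ingredients = [
--         item[0] for item in sorted(scored_ingredients, key=lambda x: x[1], reverse=True)
--     ]
--     return sorted_ingredients[:max_count]
-- ===== SOURCE B (Python) =====
-- _CATEGORY_STRINGS = [
--     "chicken beef pork fish tuna shrimp tofu beans lentils",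
--     "rice pasta potato bread noodle quinoa",
--     "onion garlic tomato carrot broccoli spinach lettuce pepper",
--     "cheese milk yogurt cream butter",
--     "sauce oil vinegar mayonnaise mustard ketchup salsa",
-- ]
--
--
-- def _matches(low, cat):
--     return any(kw in low for kw in cat)
--
--
-- def _prioritize_cooking_ingredients(ingredients, max_count=15):
--     """Staged-filter re-implementation: for each priority category (highest
--     first) make one pass keeping the ingredients whose FIRST matching category
--     it is, then one pass for the unmatched ones; truncate.  No scoring, no
--     sort, no buckets."""
--     cats = [s.split() for s in _CATEGORY_STRINGS]
--     result = []
--     for w in range(len(cats)):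
--         for ing in ingredients:
--             low = ing.lower()
--             if _matches(low, cats[w]) and not any(_matches(low, c) for c in cats[:w]):
--                 result.append(ing)
--     for ing in ingredients:
--         low = ing.lower()
--         if not any(_matches(low, c) for c in cats):
--             result.append(ing)
--     return result[:max_count]
-- ===== Notes on version B (the rewrite author's own statement) =====
-- stated objective: alternative
-- what changed: Replaces score-then-stable-sort with staged filtering over categories kept as split keyword strings: one pass per priority category keeps the ingredients whose first matching category it is, a final pass keeps the unmatched ones, then truncate; no scores, no sort.
import Mathlib
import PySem

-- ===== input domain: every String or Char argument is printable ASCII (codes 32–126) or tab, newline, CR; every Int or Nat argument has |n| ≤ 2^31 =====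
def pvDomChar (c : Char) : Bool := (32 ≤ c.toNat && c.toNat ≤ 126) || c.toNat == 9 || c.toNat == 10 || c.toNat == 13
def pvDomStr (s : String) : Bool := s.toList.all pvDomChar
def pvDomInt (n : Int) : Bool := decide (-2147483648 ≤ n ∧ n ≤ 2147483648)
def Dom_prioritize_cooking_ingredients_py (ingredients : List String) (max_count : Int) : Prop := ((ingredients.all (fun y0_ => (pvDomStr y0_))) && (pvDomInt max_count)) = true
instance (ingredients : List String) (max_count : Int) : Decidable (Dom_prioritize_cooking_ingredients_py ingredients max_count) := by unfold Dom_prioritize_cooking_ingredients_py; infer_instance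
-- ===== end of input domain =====

-- B replaces A's score-then-stable-sort with staged filtering: one pass per
-- priority category keeping the ingredients whose first matching category it
-- is, then a pass for the unmatched ones; a different algorithm, similar cost
-- ("alternative").

-- ===== PORT A =====
-- A's nested priority_categories literal
def pvCategories : List (List String) :=
  [ ["chicken", "beef", "pork", "fish", "tuna", "shrimp", "tofu", "beans", "lentils"],
    ["rice", "pasta", "potato", "bread", "noodle", "quinoa"],
    ["onion", "garlic", "tomato", "carrot", "broccoli", "spinach", "lettuce", "pepper"],
    ["cheese", "milk", "yogurt", "cream", "butter"],
    ["sauce", "oil", "vinegar", "mayonnaise", "mustard", "ketchup", "salsa"] ]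

-- A's inner 'for i, category in enumerate(...): if any(...): score = 5 - i; break'
-- (score starts at 0 and is kept when the loop falls through)
def pvScoreA (ing_lower : String) (i : Int) : List (List String) → Int
  | [] => 0
  | cat :: rest =>
    if cat.any (fun keyword => PySem.Str.isIn keyword ing_lower) then 5 - i
    else pvScoreA ing_lower (i + 1) rest

def prioritize_cooking_ingredients_py (ingredients : List String) (max_count : Int) : List String :=
  let scored_ingredients :=
    ingredients.foldl
      (fun acc ing => acc ++ [(ing, pvScoreA (PySem.Str.lower ing) 0 pvCategories)]) []
  let sorted_ingredients :=
    (PySem.List.sorted scored_ingredients (fun x => x.2) true).map (fun item => item.1)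
  PySem.List.slice sorted_ingredients none (some max_count)

-- ===== PORT B =====
-- B's module-level _CATEGORY_STRINGS (keywords as space-separated strings, split at use)
def pvCategoryStrings : List String :=
  [ "chicken beef pork fish tuna shrimp tofu beans lentils",
    "rice pasta potato bread noodle quinoa",
    "onion garlic tomato carrot broccoli spinach lettuce pepper",
    "cheese milk yogurt cream butter",
    "sauce oil vinegar mayonnaise mustard ketchup salsa" ]

-- B's helper _matches(low, cat)
def pvMatches (low : String) (cat : List String) : Bool :=
  cat.any (fun kw => PySem.Str.isIn kw low)

def prioritize_cooking_ingredients_py_alt (ingredients : List String) (max_count : Int) : List String :=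
  let cats := pvCategoryStrings.map (fun s => PySem.Str.split₀ s)
  -- 'for w in range(len(cats)): for ing in ingredients: if _matches(low, cats[w]) and not any(... cats[:w]): result.append(ing)'
  let result :=
    (PySem.List.pyRange 0 (cats.length : Int) 1).foldl
      (fun acc w =>
        ingredients.foldl
          (fun acc2 ing =>
            if pvMatches (PySem.Str.lower ing) (PySem.List.pyGetD cats w []) &&
               !((PySem.List.slice cats none (some w)).any
                   (fun c => pvMatches (PySem.Str.lower ing) c)) then
              acc2 ++ [ing]
            else acc2)
          acc)
      []
  -- trailing pass for ingredients matching no category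
  let result :=
    ingredients.foldl
      (fun acc ing =>
        if !(cats.any (fun c => pvMatches (PySem.Str.lower ing) c)) then acc ++ [ing]
        else acc)
      result
  PySem.List.slice result none (some max_count)

-- ===== PRECONDITION & SPEC =====
def Spec_prioritize_cooking_ingredients_py (ingredients : List String) (max_count : Int) (out : List String) : Prop := out = prioritize_cooking_ingredients_py_alt ingredients max_count
instance (ingredients : List String) (max_count : Int) (out : List String) : Decidable (Spec_prioritize_cooking_ingredients_py ingredients max_count out) := by unfold Spec_prioritize_cooking_ingredients_py; infer_instance

-- ===== CLAIM =====
def Claim_equal_prioritize_cooking_ingredients_py : Prop := ∀ (ingredients : List String) (max_count : Int), Dom_prioritize_cooking_ingredients_py ingredients max_count → Spec_prioritize_cooking_ingredients_py ingredients max_count (prioritize_cooking_ingredients_py ingredients max_count)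

-- ===== LEMMAS AND PROOFS =====

-- proof-side classifier: index of the first matching category (accumulator form)
def pvBucketIdx (ing_lower : String) (i : Nat) : List (List String) → Nat
  | [] => i
  | cat :: rest =>
    if cat.any (fun keyword => PySem.Str.isIn keyword ing_lower) then i
    else pvBucketIdx ing_lower (i + 1) rest

-- abbreviations for the two per-ingredient classifiers
def pvSc (g : String) : Int := pvScoreA (PySem.Str.lower g) 0 pvCategories
def pvBi (g : String) : Nat := pvBucketIdx (PySem.Str.lower g) 0 pvCategories

-- relation between A's score loop and the first-match index, generically
theorem pvAux_rel (l : String) : ∀ (cats : List (List String)) (i : Nat),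
    pvBucketIdx l i cats ≤ i + cats.length ∧
    pvScoreA l (i : Int) cats =
      (if pvBucketIdx l i cats = i + cats.length then 0 else 5 - (pvBucketIdx l i cats : Int)) := by
  intro cats
  induction cats with
  | nil => intro i; simp [pvBucketIdx, pvScoreA]
  | cons cat rest ih =>
    intro i
    by_cases h : cat.any (fun keyword => PySem.Str.isIn keyword l) = true
    · simp only [pvBucketIdx, pvScoreA, h, if_true]
      refine ⟨by simp, ?_⟩
      rw [if_neg (by simp only [List.length_cons]; omega)]
    · simp only [pvBucketIdx, pvScoreA, h, Bool.false_eq_true, if_false]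
      obtain ⟨ih1, ih2⟩ := ih (i + 1)
      refine ⟨by simp only [List.length_cons]; omega, ?_⟩
      have hc : ((i : Int) + 1) = ((i + 1 : Nat) : Int) := by push_cast; ring
      rw [hc, ih2]
      simp only [List.length_cons,
        show i + (rest.length + 1) = i + 1 + rest.length from by omega]

theorem pvBi_le (g : String) : pvBi g ≤ 5 := by
  have := (pvAux_rel (PySem.Str.lower g) pvCategories 0).1
  simpa [pvCategories, pvBi] using this

theorem pvSc_eq (g : String) : pvSc g = 5 - (pvBi g : Int) := by
  have h := (pvAux_rel (PySem.Str.lower g) pvCategories 0).2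
  simp only [pvCategories] at h
  simp only [pvSc, pvBi, pvCategories]
  rw [show ((0 : Nat) : Int) = 0 from rfl] at h
  rw [h]
  split_ifs with hc
  · rw [hc]; rfl
  · rfl

-- insertBy passes over a block it does not insert before
theorem pvInsertBy_skip {α : Type} (before : α → α → Bool) (x : α) :
    ∀ (l r : List α), (∀ y ∈ l, before x y = false) →
      PySem.List.insertBy before x (l ++ r) = l ++ PySem.List.insertBy before x r := by
  intro l
  induction l with
  | nil => intro r _; simp
  | cons y l ih =>
    intro r h
    have hy : before x y = false := h y (by simp)
    simp only [List.cons_append, PySem.List.insertBy, hy, Bool.false_eq_true, if_false]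
    rw [ih r (fun z hz => h z (by simp [hz]))]

-- insertBy puts x in front when it precedes everything
theorem pvInsertBy_front {α : Type} (before : α → α → Bool) (x : α) :
    ∀ (r : List α), (∀ y ∈ r, before x y = true) →
      PySem.List.insertBy before x r = x :: r := by
  intro r h
  cases r with
  | nil => rfl
  | cons y ys => simp only [PySem.List.insertBy, h y (by simp), if_true]

-- score-value filter of a scored pair list
def pvF (v : Int) (xs : List (String × Int)) : List (String × Int) :=
  xs.filter (fun p => p.2 == v)

theorem pvF_mem {v : Int} {xs : List (String × Int)} {p : String × Int}
    (h : p ∈ pvF v xs) : p.2 = v := by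
  have := List.mem_filter.mp h
  simpa using this.2

-- the stable descending sort of a {0..5}-scored list is the concatenation of its
-- score classes in descending score order
theorem pvSorted_buckets : ∀ (xs : List (String × Int)),
    (∀ p ∈ xs, 0 ≤ p.2 ∧ p.2 ≤ 5) →
    PySem.List.sorted xs (fun p => p.2) true =
      pvF 5 xs ++ pvF 4 xs ++ pvF 3 xs ++ pvF 2 xs ++ pvF 1 xs ++ pvF 0 xs := by
  intro xs
  induction xs using List.reverseRecOn with
  | nil => intro _; simp [pvF, PySem.List.sorted]
  | append_singleton xs x ih =>
    intro h
    have hxs : ∀ p ∈ xs, 0 ≤ p.2 ∧ p.2 ≤ 5 := fun p hp => h p (by simp [hp])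
    have hx : 0 ≤ x.2 ∧ x.2 ≤ 5 := h x (by simp)
    rw [PySem.List.sorted_rev_eq_foldl_insertBy, List.foldl_append, List.foldl_cons,
        List.foldl_nil, ← PySem.List.sorted_rev_eq_foldl_insertBy, ih hxs]
    have hF : ∀ v : Int, pvF v (xs ++ [x]) = pvF v xs ++ (if x.2 == v then [x] else []) := by
      intro v
      by_cases hxe : x.2 = v
      · simp [pvF, List.filter_append, List.filter, hxe]
      · have hb2 : (x.2 == v) = false := by simp [hxe]
        simp [pvF, List.filter_append, List.filter, hb2]
    set before : (String × Int) → (String × Int) → Bool :=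
      fun a b => decide (b.2 < a.2) with hb
    have hskip : ∀ v : Int, x.2 ≤ v → ∀ y ∈ pvF v xs, before x y = false := by
      intro v hv y hy
      have := pvF_mem hy
      simp [hb, this]; omega
    have hfront : ∀ v : Int, v < x.2 → ∀ y ∈ pvF v xs, before x y = true := by
      intro v hv y hy
      have := pvF_mem hy
      simp [hb, this]; omega
    obtain ⟨h0, h5⟩ := hx
    interval_cases hv : x.2
    · -- value 0: x passes every bucket and lands at the very end
      simp only [hF]
      norm_num
      rw [show pvF 5 xs ++ (pvF 4 xs ++ (pvF 3 xs ++ (pvF 2 xs ++ (pvF 1 xs ++ pvF 0 xs)))) =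
          (pvF 5 xs ++ (pvF 4 xs ++ (pvF 3 xs ++ (pvF 2 xs ++ (pvF 1 xs ++ pvF 0 xs))))) ++ ([] : List (String × Int)) from by simp]
      rw [pvInsertBy_skip before x _ [] (by
        intro y hy
        simp only [List.mem_append] at hy
        rcases hy with hy | hy | hy | hy | hy | hy <;>
          exact hskip _ (by have := pvF_mem hy; omega) y hy)]
      simp [PySem.List.insertBy]
    · -- value 1
      simp only [hF]
      norm_num
      rw [show pvF 5 xs ++ (pvF 4 xs ++ (pvF 3 xs ++ (pvF 2 xs ++ (pvF 1 xs ++ pvF 0 xs)))) =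
          (pvF 5 xs ++ pvF 4 xs ++ pvF 3 xs ++ pvF 2 xs ++ pvF 1 xs) ++ pvF 0 xs from by simp]
      rw [pvInsertBy_skip before x _ _ (by
        intro y hy
        simp only [List.mem_append] at hy
        rcases hy with ((((hy | hy) | hy) | hy) | hy) <;>
          exact hskip _ (by have := pvF_mem hy; omega) y hy)]
      rw [pvInsertBy_front before x _ (fun y hy => hfront _ (by have := pvF_mem hy; omega) y hy)]
      simp
    · -- value 2
      simp only [hF]
      norm_num
      rw [show pvF 5 xs ++ (pvF 4 xs ++ (pvF 3 xs ++ (pvF 2 xs ++ (pvF 1 xs ++ pvF 0 xs)))) =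
          (pvF 5 xs ++ pvF 4 xs ++ pvF 3 xs ++ pvF 2 xs) ++ (pvF 1 xs ++ pvF 0 xs) from by simp]
      rw [pvInsertBy_skip before x _ _ (by
        intro y hy
        simp only [List.mem_append] at hy
        rcases hy with (((hy | hy) | hy) | hy) <;>
          exact hskip _ (by have := pvF_mem hy; omega) y hy)]
      rw [pvInsertBy_front before x _ (by
        intro y hy
        simp only [List.mem_append] at hy
        rcases hy with hy | hy <;> exact hfront _ (by have := pvF_mem hy; omega) y hy)]
      simp
    · -- value 3
      simp only [hF]
      norm_num
      rw [show pvF 5 xs ++ (pvF 4 xs ++ (pvF 3 xs ++ (pvF 2 xs ++ (pvF 1 xs ++ pvF 0 xs)))) =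
          (pvF 5 xs ++ pvF 4 xs ++ pvF 3 xs) ++ (pvF 2 xs ++ pvF 1 xs ++ pvF 0 xs) from by simp]
      rw [pvInsertBy_skip before x _ _ (by
        intro y hy
        simp only [List.mem_append] at hy
        rcases hy with ((hy | hy) | hy) <;>
          exact hskip _ (by have := pvF_mem hy; omega) y hy)]
      rw [pvInsertBy_front before x _ (by
        intro y hy
        simp only [List.mem_append] at hy
        rcases hy with ((hy | hy) | hy) <;> exact hfront _ (by have := pvF_mem hy; omega) y hy)]
      simp
    · -- value 4
      simp only [hF]
      norm_num
      rw [show pvF 5 xs ++ (pvF 4 xs ++ (pvF 3 xs ++ (pvF 2 xs ++ (pvF 1 xs ++ pvF 0 xs)))) =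
          (pvF 5 xs ++ pvF 4 xs) ++ (pvF 3 xs ++ pvF 2 xs ++ pvF 1 xs ++ pvF 0 xs) from by simp]
      rw [pvInsertBy_skip before x _ _ (by
        intro y hy
        simp only [List.mem_append] at hy
        rcases hy with hy | hy <;> exact hskip _ (by have := pvF_mem hy; omega) y hy)]
      rw [pvInsertBy_front before x _ (by
        intro y hy
        simp only [List.mem_append] at hy
        rcases hy with (((hy | hy) | hy) | hy) <;> exact hfront _ (by have := pvF_mem hy; omega) y hy)]
      simp
    · -- value 5: x lands at the end of the first bucket
      simp only [hF]
      norm_num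
      rw [pvInsertBy_skip before x _ _ (fun y hy => hskip _ (by have := pvF_mem hy; omega) y hy)]
      rw [pvInsertBy_front before x _ (by
        intro y hy
        simp only [List.mem_append] at hy
        rcases hy with hy | hy | hy | hy | hy <;> exact hfront _ (by have := pvF_mem hy; omega) y hy)]

-- first-match-index filter of the ingredient list
def pvG (w : Nat) (xs : List String) : List String :=
  xs.filter (fun g => pvBi g == w)

-- B's split category strings are A's nested keyword lists
theorem pvCats_eq : pvCategoryStrings.map (fun s => PySem.Str.split₀ s) = pvCategories := by
  decide

-- the classifier as a chain of the five concrete match tests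
theorem pvBi_spec (g : String) :
    pvBi g =
      (if pvMatches (PySem.Str.lower g) (pvCategories.getD 0 []) then 0
       else if pvMatches (PySem.Str.lower g) (pvCategories.getD 1 []) then 1
       else if pvMatches (PySem.Str.lower g) (pvCategories.getD 2 []) then 2
       else if pvMatches (PySem.Str.lower g) (pvCategories.getD 3 []) then 3
       else if pvMatches (PySem.Str.lower g) (pvCategories.getD 4 []) then 4
       else 5) := by
  simp only [pvBi, pvCategories, pvBucketIdx, pvMatches, List.getD]
  norm_num

theorem pvAlt_eq (ingredients : List String) (max_count : Int) :
    prioritize_cooking_ingredients_py_alt ingredients max_count =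
      PySem.List.slice
        (pvG 0 ingredients ++ pvG 1 ingredients ++ pvG 2 ingredients ++ pvG 3 ingredients ++
          pvG 4 ingredients ++ pvG 5 ingredients) none (some max_count) := by
  unfold prioritize_cooking_ingredients_py_alt
  simp only [pvCats_eq]
  rw [show (pvCategories.length : Int) = 5 from rfl]
  rw [show PySem.List.pyRange 0 5 1 = [0,1,2,3,4] from by decide]
  simp only [List.foldl_cons, List.foldl_nil]
  rw [show PySem.List.pyGetD pvCategories (0:Int) [] = pvCategories.getD 0 [] from by decide,
      show PySem.List.pyGetD pvCategories (1:Int) [] = pvCategories.getD 1 [] from by decide,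
      show PySem.List.pyGetD pvCategories (2:Int) [] = pvCategories.getD 2 [] from by decide,
      show PySem.List.pyGetD pvCategories (3:Int) [] = pvCategories.getD 3 [] from by decide,
      show PySem.List.pyGetD pvCategories (4:Int) [] = pvCategories.getD 4 [] from by decide,
      show PySem.List.slice pvCategories none (some (0:Int)) = pvCategories.take 0 from by decide,
      show PySem.List.slice pvCategories none (some (1:Int)) = pvCategories.take 1 from by decide,
      show PySem.List.slice pvCategories none (some (2:Int)) = pvCategories.take 2 from by decide,
      show PySem.List.slice pvCategories none (some (3:Int)) = pvCategories.take 3 from by decide,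
      show PySem.List.slice pvCategories none (some (4:Int)) = pvCategories.take 4 from by decide]
  simp only [PySem.List.foldl_append_if_eq_filter, List.nil_append]
  congr 1
  have e : ∀ (p : String → Bool) (w : Nat), (∀ g, p g = (pvBi g == w)) →
      List.filter p ingredients = pvG w ingredients := by
    intro p w hp; unfold pvG; exact List.filter_congr (fun g _ => hp g)
  rw [e _ 0 ?_, e _ 1 ?_, e _ 2 ?_, e _ 3 ?_, e _ 4 ?_, e _ 5 ?_]
  all_goals
    intro g
    rw [pvBi_spec g]
    try rw [show List.take 0 pvCategories = ([] : List (List String)) from rfl]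
    try rw [show List.take 1 pvCategories = [pvCategories.getD 0 []] from rfl]
    try rw [show List.take 2 pvCategories = [pvCategories.getD 0 [], pvCategories.getD 1 []] from rfl]
    try rw [show List.take 3 pvCategories = [pvCategories.getD 0 [], pvCategories.getD 1 [], pvCategories.getD 2 []] from rfl]
    try rw [show List.take 4 pvCategories = [pvCategories.getD 0 [], pvCategories.getD 1 [], pvCategories.getD 2 [], pvCategories.getD 3 []] from rfl]
    try rw [show (pvCategories.any fun c => pvMatches (PySem.Str.lower g) c) =
        [pvCategories.getD 0 [], pvCategories.getD 1 [], pvCategories.getD 2 [], pvCategories.getD 3 [], pvCategories.getD 4 []].any (fun c => pvMatches (PySem.Str.lower g) c) from rfl]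
    simp only [List.any_cons, List.any_nil]
    generalize pvMatches (PySem.Str.lower g) (pvCategories.getD 0 []) = m0
    generalize pvMatches (PySem.Str.lower g) (pvCategories.getD 1 []) = m1
    generalize pvMatches (PySem.Str.lower g) (pvCategories.getD 2 []) = m2
    generalize pvMatches (PySem.Str.lower g) (pvCategories.getD 3 []) = m3
    generalize pvMatches (PySem.Str.lower g) (pvCategories.getD 4 []) = m4
    revert m0 m1 m2 m3 m4
    decide

-- ===== VERDICT =====
theorem prioritize_cooking_ingredients_py_spec : Claim_equal_prioritize_cooking_ingredients_py := by
  intro ingredients max_count _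
  unfold Spec_prioritize_cooking_ingredients_py
  rw [pvAlt_eq]
  unfold prioritize_cooking_ingredients_py
  simp only [PySem.List.foldl_append_singleton_eq_map, List.nil_append]
  congr 1
  have hsc : ∀ g : String,
      pvScoreA (PySem.Str.lower g) 0 pvCategories = pvSc g := fun _ => rfl
  have hbounds : ∀ p ∈ ingredients.map (fun ing => (ing, pvSc ing)), 0 ≤ p.2 ∧ p.2 ≤ 5 := by
    intro p hp
    obtain ⟨g, _, rfl⟩ := List.mem_map.mp hp
    have h1 := pvSc_eq g
    have h2 := pvBi_le g
    simp only [h1]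
    omega
  simp only [hsc]
  rw [pvSorted_buckets _ hbounds]
  have hF : ∀ v : Int, (pvF v (ingredients.map (fun ing => (ing, pvSc ing)))).map (fun it => it.1)
      = ingredients.filter (fun g => pvSc g == v) := by
    intro v
    simp only [pvF, List.filter_map]
    rw [List.map_map]
    simp [Function.comp_def]
  have hFG : ∀ (v : Int) (w : Nat), v = 5 - (w : Int) → w ≤ 5 →
      ingredients.filter (fun g => pvSc g == v) = pvG w ingredients := by
    intro v w hvw _
    apply List.filter_congr
    intro g _
    have h1 := pvSc_eq g
    have h2 := pvBi_le g
    rw [Bool.eq_iff_iff]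
    simp only [beq_iff_eq]
    rw [h1, hvw]
    omega
  simp only [List.map_append, hF]
  rw [hFG 5 0 (by norm_num) (by norm_num), hFG 4 1 (by norm_num) (by norm_num),
      hFG 3 2 (by norm_num) (by norm_num), hFG 2 3 (by norm_num) (by norm_num),
      hFG 1 4 (by norm_num) (by norm_num), hFG 0 5 (by norm_num) (by norm_num)]
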